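-- pv_equiv track=rewrite | github.com/L200180183/Prak_algostruk | L200180183_ModulKe1_KelasG/modul1no3.py | jumlahHurufVokal
-- ===== SOURCE A (Python) =====
-- def jumlahHurufVokal(text):
--     vokal = 'aiueoAIUEO'
--     jumlahVokal = ""
--     for i in text:
--         if i in vokal:
--             jumlahVokal += i
--     x = [len(text), len(jumlahVokal)]
--     return x
-- ===== SOURCE B (Python) =====
-- def jumlahHurufVokal(text):
--     count = 0
--     for v in 'aiueoAIUEO':
--         count += text.count(v)
--     return [len(text), count]
-- ===== Notes on version B (the rewrite author's own statement) =====
-- stated objective: faster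
-- what changed: Instead of one per-character Python loop that membership-tests each character and builds a vowel string, B loops over the ten distinct vowel characters and sums text.count(v), pushing the scanning into the C-implemented str.count.
import Mathlib
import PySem

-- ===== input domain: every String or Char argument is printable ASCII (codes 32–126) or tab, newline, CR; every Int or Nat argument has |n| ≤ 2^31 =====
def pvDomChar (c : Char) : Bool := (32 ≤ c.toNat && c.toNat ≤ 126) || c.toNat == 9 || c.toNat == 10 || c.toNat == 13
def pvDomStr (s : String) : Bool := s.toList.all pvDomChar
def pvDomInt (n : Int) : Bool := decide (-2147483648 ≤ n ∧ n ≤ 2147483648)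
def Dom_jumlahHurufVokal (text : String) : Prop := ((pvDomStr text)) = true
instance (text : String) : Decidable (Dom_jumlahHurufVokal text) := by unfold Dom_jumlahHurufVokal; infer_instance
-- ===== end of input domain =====

-- B replaces A's single membership-checking pass (building a vowel string, then taking its length)
-- by a running sum of per-vowel occurrence counts over the ten vowel characters (measured faster in Python).

-- ===== PORT A =====
-- for i in text: if i in vokal: jumlahVokal += i;  return [len(text), len(jumlahVokal)]
def jumlahHurufVokal (text : String) : List Int :=
  let vokal := "aiueoAIUEO"
  let jumlahVokal := text.toList.foldl
    (fun acc i => if PySem.Str.isIn (String.ofList [i]) vokal then acc ++ [i] else acc)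
    ([] : List Char)
  [PySem.Str.len text, (jumlahVokal.length : Int)]

-- ===== PORT B =====
-- count = 0; for v in 'aiueoAIUEO': count += text.count(v);  return [len(text), count]
def jumlahHurufVokal_alt (text : String) : List Int :=
  let count := "aiueoAIUEO".toList.foldl
    (fun acc v => acc + (PySem.Str.count text (String.ofList [v]) : Int)) 0
  [PySem.Str.len text, count]

-- ===== PRECONDITION & SPEC =====
def Spec_jumlahHurufVokal (text : String) (out : List Int) : Prop := out = jumlahHurufVokal_alt text
instance (text : String) (out : List Int) : Decidable (Spec_jumlahHurufVokal text out) := by unfold Spec_jumlahHurufVokal; infer_instance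

-- ===== CLAIM (what is proved, stated in full; the proofs are below) =====
def Claim_equal_jumlahHurufVokal : Prop := ∀ (text : String), Dom_jumlahHurufVokal text → Spec_jumlahHurufVokal text (jumlahHurufVokal text)

-- ===== LEMMAS AND PROOFS =====

-- 'c in vokal' for a one-character string is list membership
theorem singleton_infix_iff (c : Char) (l : List Char) : [c] <:+: l ↔ c ∈ l := by
  constructor
  · intro h; exact h.mem (List.mem_singleton_self c)
  · intro h
    obtain ⟨s, t, rfl⟩ := List.append_of_mem h
    exact ⟨s, t, by simp⟩

theorem isIn_singleton (c : Char) (l : List Char) :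
    PySem.Chars.isIn [c] l = l.contains c := by
  by_cases h : c ∈ l
  · rw [(PySem.Chars.isIn_iff_infix [c] l).2 ((singleton_infix_iff c l).2 h)]
    simpa using h
  · rw [(PySem.Chars.isIn_eq_false_iff [c] l).2 (fun hi => h ((singleton_infix_iff c l).1 hi))]
    simpa using h

-- s.count(v) for a one-character pattern counts occurrences of that character
theorem count_go_singleton (c : Char) :
    ∀ (fuel : Nat) (l : List Char) (acc : Nat), l.length ≤ fuel →
      PySem.Chars.count.go [c] fuel l acc = acc + l.count c := by
  intro fuel
  induction fuel with
  | zero =>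
    intro l acc h
    have : l = [] := List.eq_nil_of_length_eq_zero (Nat.le_zero.1 h)
    subst this; simp [PySem.Chars.count.go]
  | succ n ih =>
    intro l acc h
    cases l with
    | nil => simp [PySem.Chars.count.go]
    | cons x t =>
      simp only [PySem.Chars.count.go]
      by_cases hx : x = c
      · subst hx
        simp only [List.isPrefixOf, BEq.rfl, Bool.and_true, if_true, List.length_singleton,
          List.drop_succ_cons, List.drop_zero]
        rw [ih t (acc + 1) (by simpa using h)]
        rw [List.count_cons]
        simp; omega
      · have hpre : [c].isPrefixOf (x :: t) = false := by
          simp [List.isPrefixOf]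
          intro hc; exact absurd hc.symm hx
        rw [hpre]
        simp only [if_false, Bool.false_eq_true]
        rw [ih t acc (by simpa using h)]
        rw [List.count_cons]
        simp [hx]

theorem chars_count_singleton (l : List Char) (c : Char) :
    PySem.Chars.count l [c] = l.count c := by
  have := count_go_singleton c l.length l 0 (le_refl _)
  simp [PySem.Chars.count]
  simpa using this

-- the sum of per-vowel counts over a duplicate-free vowel list is the membership count
theorem sum_counts (V : List Char) (hV : V.Nodup) (cs : List Char) :
    ((V.map (fun v => (cs.count v : Int))).sum) = (cs.countP (fun c => V.contains c) : Int) := by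
  induction cs with
  | nil => simp
  | cons c cs ih =>
    have hcount : ∀ v : Char, ((c :: cs).count v : Int)
        = (cs.count v : Int) + (if c = v then 1 else 0) := by
      intro v
      simp only [List.count_cons]
      by_cases h : c = v <;> simp [h]
    have hmap : (V.map (fun v => ((c :: cs).count v : Int)))
        = V.map (fun v => (cs.count v : Int) + (if c = v then 1 else 0)) := by
      simp only [hcount]
    rw [hmap]
    have hsplit : ∀ (W : List Char),
        (W.map (fun v => (cs.count v : Int) + (if c = v then 1 else 0))).sum
        = (W.map (fun v => (cs.count v : Int))).sum
          + (W.map (fun v => ((if c = v then 1 else 0) : Int))).sum := by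
      intro W
      induction W with
      | nil => simp
      | cons w W ihW => simp only [List.map_cons, List.sum_cons, ihW]; ring
    rw [hsplit, ih]
    have hind : ∀ (W : List Char), W.Nodup →
        (W.map (fun v => ((if c = v then 1 else 0) : Int))).sum
        = if W.contains c then 1 else 0 := by
      intro W hW
      induction W with
      | nil => simp
      | cons w W ihW =>
        by_cases hw : c = w
        · subst hw
          have : W.contains c = false := by simpa using (List.nodup_cons.1 hW).1
          have hc : c ∉ W := by simpa using this
          simp [List.sum_cons, ihW (List.nodup_cons.1 hW).2, hc]
        · simp only [List.map_cons, List.sum_cons, if_neg hw, ihW (List.nodup_cons.1 hW).2]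
          have : ((w :: W).contains c) = W.contains c := by
            simp only [List.contains_cons]
            simp [hw]
          rw [this]; ring
    rw [hind V hV]
    rw [List.countP_cons]
    cases hc : V.contains c
    · simp
    · simp

-- ===== VERDICT (by name: the statement is the Claim_ definition above) =====
theorem jumlahHurufVokal_spec : Claim_equal_jumlahHurufVokal := by
  intro text _
  unfold Spec_jumlahHurufVokal jumlahHurufVokal jumlahHurufVokal_alt
  simp only
  congr 1
  have hA : (text.toList.foldl
      (fun acc i => if PySem.Str.isIn (String.ofList [i]) "aiueoAIUEO" then acc ++ [i] else acc)
      ([] : List Char))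
      = (text.toList.filter (fun i => PySem.Str.isIn (String.ofList [i]) "aiueoAIUEO")).map id := by
    simpa using PySem.List.foldl_append_if
      (fun i => PySem.Str.isIn (String.ofList [i]) "aiueoAIUEO") id text.toList []
  have hB : ("aiueoAIUEO".toList.foldl
      (fun acc v => acc + (PySem.Str.count text (String.ofList [v]) : Int)) 0)
      = (("aiueoAIUEO".toList.map (fun v => (text.toList.count v : Int))).sum) := by
    rw [PySem.List.foldl_add]
    simp [PySem.Str.count_eq, chars_count_singleton]
  rw [hA, hB, sum_counts "aiueoAIUEO".toList (by decide)]
  simp only [List.map_id]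
  have hlen : (List.filter (fun i => PySem.Str.isIn (String.ofList [i]) "aiueoAIUEO") text.toList).length
      = List.countP (fun c => "aiueoAIUEO".toList.contains c) text.toList := by
    rw [← List.countP_eq_length_filter]
    apply List.countP_congr
    intro x _
    have h1 : (String.ofList [x]).toList = [x] := by simp
    rw [PySem.Str.isIn, h1, isIn_singleton]
  rw [hlen]
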